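-- pv_equiv track=rewrite | github.com/Vhas27/wblcass | ep_3results.py | assign_system
-- ===== SOURCE A (Python) =====
-- def assign_system(item):
--     if 'ROOF' in item:
--         return 'Roof'
--     elif any(x in item for x in ['SLAB', 'FLOOR']):
--         return 'Floor'
--     elif 'WALL' in item:
--         return 'Wall'
--     elif any(x in item for x in ['WINDOW', 'DOOR']):
--         return 'Opening'
--     else:
--         return 'n/a'
-- ===== SOURCE B (Python) =====
-- KEYWORD_PRIORITY = {'ROOF': 0, 'SLAB': 1, 'FLOOR': 1, 'WALL': 2,
--                     'WINDOW': 3, 'DOOR': 3}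
-- CATEGORIES = ['Roof', 'Floor', 'Wall', 'Opening']
--
-- def assign_system(item):
--     hits = [p for k, p in KEYWORD_PRIORITY.items() if k in item]
--     return CATEGORIES[min(hits)] if hits else 'n/a'
-- ===== Notes on version B (the rewrite author's own statement) =====
-- stated objective: alternative
-- what changed: Instead of a short-circuiting if/elif chain of substring tests, B checks every keyword, collects the priorities of all keywords present, and returns the category of the minimum priority (no match -> 'n/a').
import Mathlib
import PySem

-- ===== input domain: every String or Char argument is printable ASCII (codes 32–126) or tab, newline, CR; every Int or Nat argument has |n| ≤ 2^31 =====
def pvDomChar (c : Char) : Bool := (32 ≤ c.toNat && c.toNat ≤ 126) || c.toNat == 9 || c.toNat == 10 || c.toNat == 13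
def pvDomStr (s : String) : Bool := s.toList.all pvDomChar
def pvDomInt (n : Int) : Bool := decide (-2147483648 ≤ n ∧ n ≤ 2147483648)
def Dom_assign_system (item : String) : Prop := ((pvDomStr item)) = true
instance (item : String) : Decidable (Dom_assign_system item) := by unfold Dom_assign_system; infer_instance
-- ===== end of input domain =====

-- B replaces A's short-circuiting if/elif chain by collecting the priorities of ALL matching keywords and indexing the category table by their minimum (alternative decomposition, same behaviour).
-- ===== PORT A =====
def assign_system (item : String) : String :=
  if PySem.Str.isIn "ROOF" item then "Roof"
  else if ["SLAB", "FLOOR"].any (fun x => PySem.Str.isIn x item) then "Floor"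
  else if PySem.Str.isIn "WALL" item then "Wall"
  else if ["WINDOW", "DOOR"].any (fun x => PySem.Str.isIn x item) then "Opening"
  else "n/a"

-- ===== PORT B =====
def pvKeywordPriority : List (String × Nat) :=
  [("ROOF", 0), ("SLAB", 1), ("FLOOR", 1), ("WALL", 2), ("WINDOW", 3), ("DOOR", 3)]

def pvCategories : List String := ["Roof", "Floor", "Wall", "Opening"]

def assign_system_alt (item : String) : String :=
  let hits := (pvKeywordPriority.filter (fun kp => PySem.Str.isIn kp.1 item)).map Prod.snd
  match hits.min? with
  | none => "n/a"
  | some p => pvCategories.getD p "n/a"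

-- ===== PRECONDITION & SPEC =====
def Spec_assign_system (item : String) (out : String) : Prop := out = assign_system_alt item
instance (item : String) (out : String) : Decidable (Spec_assign_system item out) := by unfold Spec_assign_system; infer_instance

-- ===== CLAIM (what is proved, stated in full; the proofs are below) =====
def Claim_equal_assign_system : Prop := ∀ (item : String), Dom_assign_system item → Spec_assign_system item (assign_system item)

-- ===== LEMMAS AND PROOFS =====

-- ===== VERDICT (by name: the statement is the Claim_ definition above) =====
theorem assign_system_spec : Claim_equal_assign_system := by
  intro item _
  unfold Spec_assign_system assign_system assign_system_alt pvKeywordPriority pvCategories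
  by_cases h1 : PySem.Chars.isIn "ROOF".toList item.toList = true <;>
  by_cases h2 : PySem.Chars.isIn "SLAB".toList item.toList = true <;>
  by_cases h3 : PySem.Chars.isIn "FLOOR".toList item.toList = true <;>
  by_cases h4 : PySem.Chars.isIn "WALL".toList item.toList = true <;>
  by_cases h5 : PySem.Chars.isIn "WINDOW".toList item.toList = true <;>
  by_cases h6 : PySem.Chars.isIn "DOOR".toList item.toList = true <;>
    simp_all [List.min?]
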